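-- pv_equiv track=rewrite | github.com/Sharrrkkk/word_game_solver | src/word_game_solver/core.py | data_analysis
-- ===== SOURCE A (Python) =====
-- import itertools
--
-- def data_analysis(file: dict[str, list[str]], data: tuple[int, str])-> str:
--     combinations: set[str] = set()
--     n: int
--     word: str
--     n, word = data
--     for combination in itertools.combinations(word, n):
--         combinations.add(''.join(sorted(combination)))
--     words_list: list[list[str]] = []
--     for combination_str in combinations:
--         if file[combination_str]:
--             words: list[str] = file[combination_str]
--             words_list.append(words)
--
--     cache: list[str] = [' '.join(words) for words in words_list]
--     result:str = ' '.join(sorted(set(cache)))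
--     return result
-- ===== SOURCE B (Python) =====
-- def data_analysis(file: dict[str, list[str]], data: tuple[int, str]) -> str:
--     n, word = data
--     counts: dict[str, int] = {}
--     for ch in word:
--         counts[ch] = counts.get(ch, 0) + 1
--     letters = sorted(counts)
--     keys: list[str] = []
--
--     def rec(i: int, remaining: int, prefix: str) -> None:
--         if remaining == 0:
--             keys.append(prefix)
--             return
--         if i == len(letters):
--             return
--         ch = letters[i]
--         for take in range(min(counts[ch], remaining), -1, -1):
--             rec(i + 1, remaining - take, prefix + ch * take)
--
--     rec(0, n, '')
--     results: set[str] = set()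
--     for key in keys:
--         words = file[key]
--         if words:
--             results.add(' '.join(words))
--     return ' '.join(sorted(results))
-- ===== Notes on version B (the rewrite author's own statement) =====
-- stated objective: alternative
-- what changed: A enumerates all itertools.combinations of letter positions, sorting and set-deduplicating each tuple; B counts the word's letters once and recurses over the distinct sorted letters choosing a multiplicity for each (summing to n), emitting every distinct sorted key exactly once with no per-key sort or dedup.
import Mathlib
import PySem

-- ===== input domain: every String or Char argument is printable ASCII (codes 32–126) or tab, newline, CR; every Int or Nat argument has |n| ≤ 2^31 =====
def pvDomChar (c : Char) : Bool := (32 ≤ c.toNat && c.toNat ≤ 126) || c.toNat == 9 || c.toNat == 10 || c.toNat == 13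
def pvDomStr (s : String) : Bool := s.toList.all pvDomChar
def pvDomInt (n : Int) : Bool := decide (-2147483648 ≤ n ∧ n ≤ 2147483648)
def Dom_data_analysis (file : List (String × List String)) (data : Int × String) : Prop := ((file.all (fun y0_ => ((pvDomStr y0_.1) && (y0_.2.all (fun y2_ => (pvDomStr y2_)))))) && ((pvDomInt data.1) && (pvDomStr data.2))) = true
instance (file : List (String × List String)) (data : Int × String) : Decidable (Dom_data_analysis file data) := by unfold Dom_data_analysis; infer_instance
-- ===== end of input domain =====

-- B replaces A's itertools.combinations-over-positions + per-combination sort + set dedup by a direct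
-- recursion over the distinct sorted letters of the word choosing a multiplicity for each, which emits
-- every distinct sorted key once; same return value on Pre_ (objective: alternative algorithm).

-- ===== PORT A =====
-- itertools.combinations(word, n): all index-combinations, in itertools order.
def pyCombos : List Char → Nat → List (List Char)
  | _, 0 => [[]]
  | [], _ + 1 => []
  | x :: xs, n + 1 => (pyCombos xs n).map (x :: ·) ++ pyCombos xs (n + 1)
termination_by l _ => l.length

def data_analysis (file : List (String × List String)) (data : Int × String) : String :=
  let n : Int := data.1
  let word : String := data.2
  -- for combination in itertools.combinations(word, n): combinations.add(''.join(sorted(combination)))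
  let combinations : PySem.Set String :=
    (pyCombos word.toList n.toNat).foldl
      (fun s c =>
        PySem.Set.add s
          (String.ofList (PySem.Chars.join [] ((PySem.List.sorted c (fun x => x)).map (fun ch => [ch])))))
      PySem.Set.empty
  let d : PySem.Dict String (List String) := PySem.Dict.mk file
  -- for combination_str in combinations: if file[combination_str]: words_list.append(file[combination_str])
  let words_list : List (List String) :=
    combinations.foldl
      (fun acc k => if (!(d.getD k []).isEmpty) = true then acc ++ [d.getD k []] else acc) []
  let cache : List String := words_list.map (fun ws => PySem.Str.join " " ws)
  PySem.Str.join " " (PySem.List.sorted (PySem.Set.ofList cache) (fun x => x))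

-- ===== PORT B =====
-- counts[ch] = counts.get(ch, 0) + 1
def bCounts (w : List Char) : PySem.Dict Char Int :=
  w.foldl (fun d ch => d.insert ch (d.getD ch 0 + 1)) PySem.Dict.empty

-- rec(i, remaining, prefix): choose take = min(counts[ch], remaining) .. 0 for each letter in turn
def bRec (counts : PySem.Dict Char Int) (letters : List Char) (r : Int) (pre : List Char) :
    List (List Char) :=
  if r = 0 then [pre]
  else
    match letters with
    | [] => []
    | ch :: rest =>
      (PySem.List.pyRange (min (counts.getD ch 0) r) (-1) (-1)).flatMap
        (fun t => bRec counts rest (r - t) (pre ++ List.replicate t.toNat ch))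

def data_analysis_alt (file : List (String × List String)) (data : Int × String) : String :=
  let n : Int := data.1
  let word : String := data.2
  let counts : PySem.Dict Char Int := bCounts word.toList
  let letters : List Char := PySem.List.sorted counts.keys (fun x => x)
  let keys : List (List Char) := bRec counts letters n []
  let d : PySem.Dict String (List String) := PySem.Dict.mk file
  let results : PySem.Set String :=
    keys.foldl
      (fun s k =>
        if (!(d.getD (String.ofList k) []).isEmpty) = true
        then PySem.Set.add s (PySem.Str.join " " (d.getD (String.ofList k) []))
        else s)
      PySem.Set.empty
  PySem.Str.join " " (PySem.List.sorted results (fun x => x))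

-- ===== PRECONDITION & SPEC =====
-- Pre_ admits exactly the inputs where Python A returns: n ≥ 0 (itertools.combinations raises
-- ValueError on negative n) and every sorted size-n letter combination of word is a key of file
-- (bare file[...] indexing raises KeyError otherwise; B indexes the same keys).
def Pre_data_analysis (file : List (String × List String)) (data : Int × String) : Prop :=
  0 ≤ data.1 ∧
    ∀ c ∈ List.sublistsLen data.1.toNat data.2.toList,
      (String.ofList (PySem.List.sorted c (fun x => x))) ∈ file.map Prod.fst
instance (file : List (String × List String)) (data : Int × String) :
    Decidable (Pre_data_analysis file data) := by unfold Pre_data_analysis; infer_instance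

def pvWitness_data_analysis : (List (String × List String)) × (Int × String) :=
  ([("a", ["cat"])], (1, "a"))

def Spec_data_analysis (file : List (String × List String)) (data : Int × String) (out : String) : Prop := out = data_analysis_alt file data
instance (file : List (String × List String)) (data : Int × String) (out : String) : Decidable (Spec_data_analysis file data out) := by unfold Spec_data_analysis; infer_instance

-- ===== CLAIM (what is proved, stated in full; the proofs are below) =====
def Claim_equal_data_analysis : Prop := ∀ (file : List (String × List String)) (data : Int × String), Dom_data_analysis file data → Pre_data_analysis file data → Spec_data_analysis file data (data_analysis file data)

-- ===== LEMMAS AND PROOFS =====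

-- membership in the itertools combination list = sublists of the given length
theorem mem_pyCombos (l : List Char) (m : Nat) (c : List Char) :
    c ∈ pyCombos l m ↔ c.Sublist l ∧ c.length = m := by
  induction l generalizing m c with
  | nil =>
    cases m with
    | zero => simp [pyCombos, List.length_eq_zero_iff]
    | succ m => simp [pyCombos]; rintro rfl; simp
  | cons x xs ih =>
    cases m with
    | zero =>
      simp only [pyCombos, List.mem_singleton, List.length_eq_zero_iff]
      constructor
      · rintro rfl; exact ⟨List.nil_sublist _, rfl⟩
      · rintro ⟨_, rfl⟩; rfl
    | succ m =>
      simp only [pyCombos, List.mem_append, List.mem_map, ih, List.sublist_cons_iff]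
      constructor
      · rintro (⟨c', ⟨hs, hl⟩, rfl⟩ | ⟨hs, hl⟩)
        · exact ⟨Or.inr ⟨c', rfl, hs⟩, by simp [hl]⟩
        · exact ⟨Or.inl hs, hl⟩
      · rintro ⟨hs | ⟨r, rfl, hr⟩, hl⟩
        · exact Or.inr ⟨hs, hl⟩
        · exact Or.inl ⟨r, ⟨hr, by simpa using hl⟩, rfl⟩

-- membership in a descending range down to 0
theorem mem_pyRange_down (a t : Int) :
    t ∈ PySem.List.pyRange a (-1) (-1) ↔ 0 ≤ t ∧ t ≤ a := by
  simp only [PySem.List.pyRange]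
  norm_num
  constructor
  · rintro ⟨k, hk, rfl⟩
    split at hk
    · next h => omega
    · omega
  · rintro ⟨h0, ha⟩
    refine ⟨(a - t).toNat, ?_, by omega⟩
    split
    · next h => omega
    · omega

-- expansion of a letters-with-counts list back into a flat character list
def bExpand (counts : PySem.Dict Char Int) (letters : List Char) : List Char :=
  letters.flatMap (fun ch => List.replicate (counts.getD ch 0).toNat ch)

-- what bRec emits: exactly the (canonical) sublists of the expansion, of total Int length r
theorem mem_bRec (counts : PySem.Dict Char Int) (hc : ∀ ch, 0 ≤ counts.getD ch 0)
    (letters : List Char) (r : Int) (pre k : List Char) :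
    k ∈ bRec counts letters r pre ↔
      ∃ s, k = pre ++ s ∧ s.Sublist (bExpand counts letters) ∧ (s.length : Int) = r := by
  induction letters generalizing r pre with
  | nil =>
    rw [bRec]
    by_cases hr : r = 0
    · subst hr
      simp only [if_true, List.mem_singleton, bExpand, List.flatMap_nil]
      constructor
      · rintro rfl; exact ⟨[], by simp⟩
      · rintro ⟨s, rfl, hs, hl⟩
        have : s = [] := List.sublist_nil.mp hs
        simp [this]
    · simp only [hr, if_false, List.not_mem_nil, false_iff, bExpand, List.flatMap_nil]
      rintro ⟨s, rfl, hs, hl⟩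
      have : s = [] := List.sublist_nil.mp hs
      subst this
      simp at hl
      omega
  | cons ch rest ih =>
    rw [bRec]
    by_cases hr : r = 0
    · subst hr
      simp only [if_true, List.mem_singleton]
      constructor
      · rintro rfl; exact ⟨[], by simp⟩
      · rintro ⟨s, rfl, hs, hl⟩
        have : s = [] := by
          cases s with
          | nil => rfl
          | cons a s => exfalso; simp at hl; omega
        simp [this]
    · simp only [hr, if_false, List.mem_flatMap]
      constructor
      · rintro ⟨t, ht, hk⟩
        rw [mem_pyRange_down] at ht
        obtain ⟨s', rfl, hs', hl'⟩ := (ih _ _).mp hk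
        refine ⟨List.replicate t.toNat ch ++ s', by simp, ?_, ?_⟩
        · unfold bExpand
          rw [List.flatMap_cons]
          exact List.Sublist.append
            (List.sublist_replicate_iff.mpr ⟨t.toNat, by
              have := min_le_left (counts.getD ch 0) r
              omega, rfl⟩)
            hs'
        · simp only [List.length_append, List.length_replicate]
          push_cast
          omega
      · rintro ⟨s, rfl, hs, hl⟩
        unfold bExpand at hs
        rw [List.flatMap_cons] at hs
        obtain ⟨s₁, s₂, rfl, h1, h2⟩ := List.sublist_append_iff.mp hs
        obtain ⟨u, hu, rfl⟩ := List.sublist_replicate_iff.mp h1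
        refine ⟨(u : Int), ?_, ?_⟩
        · rw [mem_pyRange_down]
          have hcnt := hc ch
          simp only [List.length_append, List.length_replicate] at hl
          constructor
          · omega
          · have : (u : Int) ≤ counts.getD ch 0 := by
              have : (u : Int) ≤ ((counts.getD ch 0).toNat : Int) := by exact_mod_cast hu
              omega
            have hur : (u : Int) ≤ r := by push_cast at hl; omega
            omega
        · apply (ih _ _).mpr
          refine ⟨s₂, ?_, h2, ?_⟩
          · simp
          · simp only [List.length_append, List.length_replicate] at hl
            push_cast at hl ⊢
            omega

theorem bCounts_getD (w : List Char) (ch : Char) :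
    (bCounts w).getD ch 0 = (w.count ch : Int) := by
  simpa [bCounts] using PySem.Dict.getD_foldl_insert_add_one w PySem.Dict.empty ch

theorem bCounts_keys (w : List Char) : (bCounts w).keys = PySem.Set.ofList w := by
  have h := PySem.Dict.keys_foldl_insert w (fun (d : PySem.Dict Char Int) x => d.getD x 0 + 1)
    PySem.Dict.empty
  rw [bCounts, PySem.Set.ofList_eq_foldl]
  exact h.trans rfl

theorem count_flatMap_replicate (g : Char → Nat) (letters : List Char) (hnd : letters.Nodup)
    (a : Char) :
    (letters.flatMap (fun ch => List.replicate (g ch) ch)).count a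
      = if a ∈ letters then g a else 0 := by
  induction letters with
  | nil => simp
  | cons ch rest ih =>
    simp only [List.flatMap_cons, List.count_append, List.count_replicate,
      ih (List.nodup_cons.mp hnd).2, List.mem_cons]
    rcases List.nodup_cons.mp hnd with ⟨hch, _⟩
    by_cases h1 : a = ch
    · subst h1
      simp [hch]
    · simp [h1, Ne.symm h1]

theorem pairwise_flatMap_replicate (g : Char → Nat) (letters : List Char)
    (h : letters.Pairwise (· < ·)) :
    (letters.flatMap (fun ch => List.replicate (g ch) ch)).Pairwise (· ≤ ·) := by
  induction letters with
  | nil => simp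
  | cons ch rest ih =>
    rcases List.pairwise_cons.mp h with ⟨hlt, hrest⟩
    simp only [List.flatMap_cons]
    apply List.pairwise_append.mpr
    refine ⟨List.pairwise_replicate.mpr (by simp), ih hrest, ?_⟩
    intro a ha b hb
    have ha' := List.eq_of_mem_replicate ha
    subst ha'
    obtain ⟨ch', hch', hb'⟩ := List.mem_flatMap.mp hb
    have := List.eq_of_mem_replicate hb'
    subst this
    exact le_of_lt (hlt _ hch')

-- the expansion of the sorted distinct letters with their counts is the sorted word
theorem bExpand_eq_sorted (w : List Char) (counts : PySem.Dict Char Int)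
    (hgetD : ∀ ch, counts.getD ch 0 = (w.count ch : Int)) :
    bExpand counts (PySem.List.sorted (PySem.Set.ofList w) (fun x => x)) =
      PySem.List.sorted w (fun x => x) := by
  set letters := PySem.List.sorted (PySem.Set.ofList w) (fun x => x) with hl
  have hnd : letters.Nodup :=
    (PySem.List.sorted_perm (PySem.Set.ofList w) (fun x => x) false).nodup_iff.mpr
      (PySem.Set.nodup_ofList w)
  have hpw : letters.Pairwise (· < ·) := PySem.List.sorted_ofList_pairwise_lt w
  have hmem : ∀ a, a ∈ letters ↔ a ∈ w := by
    intro a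
    rw [hl, PySem.List.mem_sorted, PySem.Set.mem_ofList]
  have hperm : (bExpand counts letters).Perm w := by
    apply List.perm_iff_count.mpr
    intro a
    unfold bExpand
    rw [show (fun ch => List.replicate (counts.getD ch 0).toNat ch)
        = (fun ch => List.replicate (w.count ch) ch) from by funext ch; simp [hgetD ch]]
    rw [count_flatMap_replicate (fun ch => w.count ch) letters hnd a]
    by_cases h : a ∈ w
    · simp [(hmem a).mpr h]
    · simp [List.count_eq_zero_of_not_mem h]
  have hpw' : (bExpand counts letters).Pairwise (· ≤ ·) := by
    unfold bExpand
    exact pairwise_flatMap_replicate _ letters hpw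
  exact (PySem.List.sorted_id_eq_of_perm_of_pairwise w (bExpand counts letters) hperm hpw').symm

-- sorted images of sublists of w = sublists of sorted w (same length)
theorem sorted_sublist_bridge (w k : List Char) (m : Nat) :
    (∃ c, c.Sublist w ∧ c.length = m ∧ k = PySem.List.sorted c (fun x => x)) ↔
      (k.Sublist (PySem.List.sorted w (fun x => x)) ∧ k.length = m) := by
  constructor
  · rintro ⟨c, hsub, hlen, rfl⟩
    have hperm : (PySem.List.sorted c (fun x => x)).Perm c := PySem.List.sorted_perm c _ false
    constructor
    · apply List.sublist_of_subperm_of_pairwise (r := (· ≤ ·))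
      · exact hperm.subperm.trans (hsub.subperm.trans
          (PySem.List.sorted_perm w (fun x => x) false).symm.subperm)
      · exact PySem.List.sorted_pairwise c _
      · exact PySem.List.sorted_pairwise w _
    · rw [hperm.length_eq, hlen]
  · rintro ⟨hsub, hlen⟩
    have h1 : List.Subperm k w :=
      hsub.subperm.trans (PySem.List.sorted_perm w (fun x => x) false).subperm
    obtain ⟨c, hck, hcw⟩ := h1
    have hkpw : k.Pairwise (· ≤ ·) := (PySem.List.sorted_pairwise w (fun x => x)).sublist hsub
    have heq : PySem.List.sorted c (fun x => x) = k :=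
      List.Perm.eq_of_pairwise' (PySem.List.sorted_pairwise c (fun x => x)) hkpw
        ((PySem.List.sorted_perm c (fun x => x) false).trans hck)
    exact ⟨c, hcw, by rw [hck.length_eq, hlen], heq.symm⟩

-- membership in a fold of Set.add
theorem mem_foldl_set_add {α β : Type} [BEq β] [LawfulBEq β] (f : α → β) (L : List α)
    (s0 : PySem.Set β) (x : β) :
    x ∈ L.foldl (fun s c => PySem.Set.add s (f c)) s0 ↔ x ∈ s0 ∨ ∃ c ∈ L, x = f c := by
  induction L generalizing s0 with
  | nil => simp
  | cons c L ih =>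
    simp only [List.foldl_cons, ih, PySem.Set.mem_add, List.mem_cons]
    constructor
    · rintro (⟨h | h⟩ | ⟨c', hc', rfl⟩)
      · exact Or.inl h
      · exact Or.inr ⟨c, Or.inl rfl, h⟩
      · exact Or.inr ⟨c', Or.inr hc', rfl⟩
    · rintro (h | ⟨c', (rfl | hc'), rfl⟩)
      · exact Or.inl (Or.inl h)
      · exact Or.inl (Or.inr rfl)
      · exact Or.inr ⟨c', hc', rfl⟩

-- membership in a guarded fold of Set.add
theorem mem_foldl_set_add_if {α β : Type} [BEq β] [LawfulBEq β] (p : α → Bool) (f : α → β)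
    (L : List α) (s0 : PySem.Set β) (x : β) :
    x ∈ L.foldl (fun s c => if p c = true then PySem.Set.add s (f c) else s) s0 ↔
      x ∈ s0 ∨ ∃ c ∈ L, p c = true ∧ x = f c := by
  induction L generalizing s0 with
  | nil => simp
  | cons c L ih =>
    by_cases hp : p c = true
    · simp only [List.foldl_cons, hp, if_true, ih, PySem.Set.mem_add, List.mem_cons]
      constructor
      · rintro (⟨h | h⟩ | ⟨c', hc', hpc', rfl⟩)
        · exact Or.inl h
        · exact Or.inr ⟨c, Or.inl rfl, hp, h⟩
        · exact Or.inr ⟨c', Or.inr hc', hpc', rfl⟩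
      · rintro (h | ⟨c', (rfl | hc'), hpc', rfl⟩)
        · exact Or.inl (Or.inl h)
        · exact Or.inl (Or.inr rfl)
        · exact Or.inr ⟨c', hc', hpc', rfl⟩
    · simp only [List.foldl_cons, hp, ih, List.mem_cons]
      constructor
      · rintro (h | ⟨c', hc', hpc', rfl⟩)
        · exact Or.inl h
        · exact Or.inr ⟨c', Or.inr hc', hpc', rfl⟩
      · rintro (h | ⟨c', (rfl | hc'), hpc', rfl⟩)
        · exact Or.inl h
        · exact absurd hpc' hp
        · exact Or.inr ⟨c', hc', hpc', rfl⟩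

theorem nodup_foldl_set_add_if {α β : Type} [BEq β] [LawfulBEq β] (p : α → Bool) (f : α → β)
    (L : List α) (s0 : PySem.Set β) (h : s0.Nodup) :
    (L.foldl (fun s c => if p c = true then PySem.Set.add s (f c) else s) s0).Nodup := by
  induction L generalizing s0 with
  | nil => simpa using h
  | cons c L ih =>
    simp only [List.foldl_cons]
    split
    · exact ih _ (PySem.Set.nodup_add s0 (f c) h)
    · exact ih _ h

-- ===== VERDICT (by name: the statement is the Claim_ definition above) =====
theorem data_analysis_spec : Claim_equal_data_analysis := by
  intro file data _hDom hPre
  obtain ⟨hn, -⟩ := hPre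
  obtain ⟨n, word⟩ := data
  replace hn : 0 ≤ n := hn
  unfold Spec_data_analysis
  simp only [data_analysis, data_analysis_alt]
  set w : List Char := word.toList with hw
  set d : PySem.Dict String (List String) := PySem.Dict.mk file with hd
  set sw : List Char := PySem.List.sorted w (fun x => x) with hsw
  -- characterise the A-side key set
  set combsA : PySem.Set String :=
    (pyCombos w n.toNat).foldl
      (fun s c =>
        PySem.Set.add s
          (String.ofList (PySem.Chars.join [] ((PySem.List.sorted c (fun x => x)).map (fun ch => [ch])))))
      PySem.Set.empty with hca
  have hmemA : ∀ x : String, x ∈ combsA ↔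
      ∃ kl : List Char, kl.Sublist sw ∧ kl.length = n.toNat ∧ x = String.ofList kl := by
    intro x
    rw [hca, mem_foldl_set_add]
    simp only [PySem.Set.empty]
    constructor
    · rintro (h | ⟨c, hc, rfl⟩)
      · simp at h
      · obtain ⟨hsub, hlen⟩ := (mem_pyCombos w n.toNat c).mp hc
        obtain ⟨hks, hkl⟩ := (sorted_sublist_bridge w (PySem.List.sorted c (fun x => x)) n.toNat).mp
          ⟨c, hsub, hlen, rfl⟩
        exact ⟨PySem.List.sorted c (fun x => x), hks, hkl,
          by rw [PySem.Chars.join_nil_singletons]⟩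
    · rintro ⟨kl, hks, hkl, rfl⟩
      obtain ⟨c, hsub, hlen, rfl⟩ := (sorted_sublist_bridge w kl n.toNat).mpr ⟨hks, hkl⟩
      exact Or.inr ⟨c, (mem_pyCombos w n.toNat c).mpr ⟨hsub, hlen⟩,
        by rw [PySem.Chars.join_nil_singletons]⟩
  -- characterise the B-side key list
  have hgetD : ∀ ch, (bCounts w).getD ch 0 = (w.count ch : Int) := bCounts_getD w
  have hc0 : ∀ ch, 0 ≤ (bCounts w).getD ch 0 := by
    intro ch; rw [hgetD ch]; positivity
  have hletters : PySem.List.sorted (bCounts w).keys (fun x => x)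
      = PySem.List.sorted (PySem.Set.ofList w) (fun x => x) := by rw [bCounts_keys]
  have hmemB : ∀ k : List Char,
      k ∈ bRec (bCounts w) (PySem.List.sorted (bCounts w).keys (fun x => x)) n [] ↔
        k.Sublist sw ∧ k.length = n.toNat := by
    intro k
    rw [mem_bRec (bCounts w) hc0]
    rw [hletters]
    rw [show bExpand (bCounts w) (PySem.List.sorted (PySem.Set.ofList w) (fun x => x)) = sw from
      bExpand_eq_sorted w (bCounts w) hgetD]
    constructor
    · rintro ⟨s, rfl, hs, hl⟩
      exact ⟨hs, by omega⟩
    · rintro ⟨hs, hl⟩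
      exact ⟨k, by simp, hs, by omega⟩
  -- the two result sets have the same members
  have hsetiff : ∀ x : String,
      x ∈ PySem.Set.ofList
        ((combsA.foldl
            (fun acc k => if (!(d.getD k []).isEmpty) = true then acc ++ [d.getD k []] else acc)
            []).map (fun ws => PySem.Str.join " " ws)) ↔
      x ∈ (bRec (bCounts w) (PySem.List.sorted (bCounts w).keys (fun x => x)) n []).foldl
        (fun s k =>
          if (!(d.getD (String.ofList k) []).isEmpty) = true
          then PySem.Set.add s (PySem.Str.join " " (d.getD (String.ofList k) []))
          else s)
        PySem.Set.empty := by
    intro x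
    rw [PySem.Set.mem_ofList, mem_foldl_set_add_if]
    rw [PySem.List.foldl_append_if (fun k => !(d.getD k []).isEmpty) (fun k => d.getD k []) combsA []]
    simp only [List.nil_append, List.mem_map, List.mem_filter, PySem.Set.empty,
      List.not_mem_nil, false_or]
    constructor
    · rintro ⟨ws, ⟨kstr, ⟨hk, hp⟩, rfl⟩, rfl⟩
      obtain ⟨kl, hks, hkl, rfl⟩ := (hmemA kstr).mp hk
      exact ⟨kl, (hmemB kl).mpr ⟨hks, hkl⟩, hp, rfl⟩
    · rintro ⟨kl, hk, hp, rfl⟩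
      obtain ⟨hks, hkl⟩ := (hmemB kl).mp hk
      exact ⟨d.getD (String.ofList kl) [],
        ⟨String.ofList kl, ⟨(hmemA _).mpr ⟨kl, hks, hkl, rfl⟩, hp⟩, rfl⟩, rfl⟩
  -- both are duplicate-free, hence permutations, hence equal once sorted
  have hnd1 : (PySem.Set.ofList
      ((combsA.foldl
          (fun acc k => if (!(d.getD k []).isEmpty) = true then acc ++ [d.getD k []] else acc)
          []).map (fun ws => PySem.Str.join " " ws))).Nodup := PySem.Set.nodup_ofList _
  have hnd2 : ((bRec (bCounts w) (PySem.List.sorted (bCounts w).keys (fun x => x)) n []).foldl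
      (fun s k =>
        if (!(d.getD (String.ofList k) []).isEmpty) = true
        then PySem.Set.add s (PySem.Str.join " " (d.getD (String.ofList k) []))
        else s)
      PySem.Set.empty).Nodup :=
    nodup_foldl_set_add_if _ _ _ _ List.nodup_nil
  have hperm := (List.perm_ext_iff_of_nodup hnd1 hnd2).mpr hsetiff
  rw [PySem.List.sorted_eq_sorted_of_perm _ _ (fun x => x) (fun _ _ h => h) hperm]
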